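-- pv_equiv track=rewrite | github.com/sagemath/sage | src/sage/misc/misc.py | newton_method_sizes
-- ===== SOURCE A (Python) =====
-- def newton_method_sizes(N):
--     r"""
--     Return a sequence of integers
--     `1 = a_1 \leq a_2 \leq \cdots \leq a_n = N` such that
--     `a_j = \lceil a_{j+1} / 2 \rceil` for all `j`.
--
--     This is useful for Newton-style algorithms that double the
--     precision at each stage. For example if you start at precision 1
--     and want an answer to precision 17, then it's better to use the
--     intermediate stages 1, 2, 3, 5, 9, 17 than to use 1, 2, 4, 8, 16,
--     17.
--
--     INPUT:
--
--     - ``N`` -- positive integer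
--
--     EXAMPLES::
--
--         sage: newton_method_sizes(17)
--         [1, 2, 3, 5, 9, 17]
--         sage: newton_method_sizes(16)
--         [1, 2, 4, 8, 16]
--         sage: newton_method_sizes(1)
--         [1]
--
--     AUTHORS:
--
--     - David Harvey (2006-09-09)
--     """
--
--     N = int(N)
--     if N < 1:
--         raise ValueError("N (={}) must be a positive integer".format(N))
--
--     output = []
--     while N > 1:
--         output.append(N)
--         N = (N + 1) >> 1
--
--     output.append(1)
--     output.reverse()
--     return output
-- ===== SOURCE B (Python) =====
-- def newton_method_sizes(N):
--     N = int(N)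
--     if N < 1:
--         raise ValueError("N (={}) must be a positive integer".format(N))
--     k = (N - 1).bit_length()
--     return [1] + [-(-N >> i) for i in range(k - 1, -1, -1)]
-- ===== Notes on version B (the rewrite author's own statement) =====
-- stated objective: alternative
-- what changed: Replaces A's iterated ceiling-halving loop with append and final reverse by a closed form: the number of stages is (N-1).bit_length() and stage i is ceil(N/2^i), emitted directly in forward order by one list comprehension.
import Mathlib
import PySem

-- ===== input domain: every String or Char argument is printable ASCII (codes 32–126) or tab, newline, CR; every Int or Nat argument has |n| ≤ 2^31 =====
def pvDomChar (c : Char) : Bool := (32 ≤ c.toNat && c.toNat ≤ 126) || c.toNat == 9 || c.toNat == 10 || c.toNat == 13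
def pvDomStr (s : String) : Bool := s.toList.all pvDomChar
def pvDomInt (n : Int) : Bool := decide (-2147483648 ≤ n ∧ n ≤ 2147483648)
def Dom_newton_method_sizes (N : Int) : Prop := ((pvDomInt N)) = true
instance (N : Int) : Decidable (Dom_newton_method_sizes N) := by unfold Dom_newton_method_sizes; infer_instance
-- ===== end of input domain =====

-- ===== PORT A =====
-- B replaces A's halving loop + append + reverse by a closed form over bit_length (objective: alternative).
-- A's while loop: output.append(N); N = (N+1) >> 1; then append 1 and reverse.
def aLoop (N : Int) (out : List Int) : List Int :=
  if _h : N > 1 then aLoop (PySem.Int.floordiv (N + 1) 2) (out ++ [N]) else out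
  termination_by N.toNat
  decreasing_by
    rw [PySem.Int.floordiv_eq_ediv_of_pos (by norm_num)]
    omega

-- literal port of A; the N < 1 branch raises ValueError in Python (excluded by Pre_)
def newton_method_sizes (N : Int) : List Int :=
  if N < 1 then [] else ((aLoop N []) ++ [1]).reverse

-- ===== PORT B =====
-- literal port of Source B; '(N-1).bit_length()' is PySem.Int.bitLength, and Python's
-- '-N >> i' on an Int is exactly floor-division of -N by 2^i (ported step for step).
def newton_method_sizes_alt (N : Int) : List Int :=
  if N < 1 then [] else
    [1] ++ (PySem.List.pyRange ((PySem.Int.bitLength (N - 1) : Int) - 1) (-1) (-1)).map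
      (fun i => -(PySem.Int.floordiv (-N) (2 ^ i.toNat)))

-- ===== PRECONDITION & SPEC =====
-- Pre_ excludes exactly N < 1, where Python A raises ValueError.
def Pre_newton_method_sizes (N : Int) : Prop := 1 ≤ N
instance (N : Int) : Decidable (Pre_newton_method_sizes N) := by unfold Pre_newton_method_sizes; infer_instance
def pvWitness_newton_method_sizes : Int := (17)
def Spec_newton_method_sizes (N : Int) (out : List Int) : Prop := out = newton_method_sizes_alt N
instance (N : Int) (out : List Int) : Decidable (Spec_newton_method_sizes N out) := by unfold Spec_newton_method_sizes; infer_instance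

-- ===== CLAIM (what is proved, stated in full; the proofs are below) =====
def Claim_equal_newton_method_sizes : Prop := ∀ (N : Int), Dom_newton_method_sizes N → Pre_newton_method_sizes N → Spec_newton_method_sizes N (newton_method_sizes N)

-- ===== LEMMAS AND PROOFS =====
-- B's list body for N ≥ 1 (proof-side abbreviation of the else-branch of the alt port)
def altBody (N : Int) : List Int :=
  [1] ++ (PySem.List.pyRange ((PySem.Int.bitLength (N - 1) : Int) - 1) (-1) (-1)).map
    (fun i => -(PySem.Int.floordiv (-N) (2 ^ i.toNat)))

theorem altBody_one : altBody 1 = [1] := by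
  unfold altBody
  norm_num [PySem.Int.bitLength_zero, PySem.List.pyRange_neg_one_eq_nil]

-- ceil(N/2^t) = ceil(ceil(N/2)/2^(t-1)) for t ≥ 1, in floor form on the negations
theorem ediv_half (N : Int) (t : Nat) (ht : 1 ≤ t) :
    (-N) / (2 ^ t) = (-(PySem.Int.floordiv (N + 1) 2)) / (2 ^ (t - 1)) := by
  rw [PySem.Int.floordiv_eq_ediv_of_pos (by norm_num)]
  have hM : -((N + 1) / 2) = (-N) / 2 := by omega
  rw [hM, Int.ediv_ediv_of_nonneg (show (0:Int) ≤ 2 by norm_num)]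
  congr 1
  rw [← pow_succ']
  congr 1
  omega

-- the recursion A performs, satisfied by B's closed form
theorem altBody_rec (N : Int) (h : 2 ≤ N) :
    altBody N = altBody (PySem.Int.floordiv (N + 1) 2) ++ [N] := by
  set M := PySem.Int.floordiv (N + 1) 2 with hMdef
  have hMed : M = (N + 1) / 2 := by
    rw [hMdef, PySem.Int.floordiv_eq_ediv_of_pos (by norm_num)]
  have hM1 : M - 1 = PySem.Int.floordiv (N - 1) 2 := by
    rw [PySem.Int.floordiv_eq_ediv_of_pos (by norm_num)]; omega
  have hbl : PySem.Int.bitLength (N - 1) = PySem.Int.bitLength (M - 1) + 1 := by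
    rw [PySem.Int.bitLength_of_pos (by omega), hM1]
  set k := PySem.Int.bitLength (M - 1) with hk
  unfold altBody
  rw [hbl, ← hk]
  have hcast : ((((k + 1 : Nat)) : Int) - 1) = (k : Int) := by push_cast; ring
  rw [hcast, PySem.List.pyRange_neg_one, PySem.List.pyRange_neg_one]
  have h1 : ((k : Int) - -1).toNat = k + 1 := by omega
  have h2 : (((k : Int) - 1) - -1).toNat = k := by omega
  rw [h1, h2, List.range_succ]
  simp only [List.map_append, List.map_map, List.map_cons, List.map_nil]
  rw [List.append_assoc]
  congr 1
  congr 1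
  · apply List.map_congr_left
    intro j hj
    have hjk : j < k := List.mem_range.mp hj
    simp only [Function.comp]
    have ht : ((k : Int) - j).toNat = k - j := by omega
    have ht' : (((k : Int) - 1) - j).toNat = (k - j) - 1 := by omega
    rw [ht, ht']
    have := ediv_half N (k - j) (by omega)
    rw [PySem.Int.floordiv_eq_ediv_of_pos (by positivity),
        PySem.Int.floordiv_eq_ediv_of_pos (by positivity)]
    rw [this]
  · have : ((k : Int) - k).toNat = 0 := by omega
    rw [this]
    norm_num [PySem.Int.floordiv_eq_ediv_of_pos]

-- loop invariant: the reversed loop output (with trailing 1) equals B's forward list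
theorem aLoop_altBody (N : Int) (hN : 1 ≤ N) (acc : List Int) :
    ((aLoop N acc) ++ [1]).reverse = altBody N ++ acc.reverse := by
  by_cases h : N > 1
  · rw [aLoop.eq_def, dif_pos h,
      aLoop_altBody (PySem.Int.floordiv (N + 1) 2)
        (by rw [PySem.Int.floordiv_eq_ediv_of_pos (by norm_num)]; omega),
      altBody_rec N (by omega)]
    simp
  · have : N = 1 := by omega
    subst this
    rw [aLoop.eq_def, dif_neg h, altBody_one]
    simp
  termination_by N.toNat
  decreasing_by
    rw [PySem.Int.floordiv_eq_ediv_of_pos (by norm_num)]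
    omega

-- ===== VERDICT (by name: the statement is the Claim_ definition above) =====
theorem newton_method_sizes_spec : Claim_equal_newton_method_sizes := by
  intro N _ hPre
  have h1 : 1 ≤ N := hPre
  unfold Spec_newton_method_sizes newton_method_sizes newton_method_sizes_alt
  rw [if_neg (by omega), if_neg (by omega)]
  have := aLoop_altBody N h1 []
  simpa [altBody] using this
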